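-- pv_equiv track=rewrite | github.com/Suldangoo/CodingTest | baekjoon/gold/3663. 고득점/고득점(wrong).py | check
-- ===== SOURCE A (Python) =====
-- def check(nums, a, b, c) :
--     num = 0
--     for i in range(a, b, c) :
--         num += nums[i]
--         nums[i] = 0
--
--         if sum(nums) == 0 :
--             break
--
--         num += 1
--     return num
-- ===== SOURCE B (Python) =====
-- def check(nums, a, b, c):
--     # Two staged passes: first collect (and zero) the values along the
--     # strided indices; then scan the collected values with a running
--     # remainder of the original total to find the break point.
--     total = sum(nums)
--     vals = []
--     for i in range(a, b, c):
--         vals.append(nums[i])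
--         nums[i] = 0
--     num = 0
--     for v in vals:
--         num += v
--         total -= v
--         if total == 0:
--             return num
--         num += 1
--     return num
-- ===== Notes on version B (the rewrite author's own statement) =====
-- stated objective: alternative
-- what changed: B is restructured into two staged passes: a collect pass that gathers (and zeroes) the strided values, and a scan pass over the collected values with a running remainder of the original total, replacing A's single fused loop that re-sums the whole list every iteration.
-- outside the precondition, e.g. on check([1], 0, 5, 1): A returns 1, B raises IndexError
import Mathlib
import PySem

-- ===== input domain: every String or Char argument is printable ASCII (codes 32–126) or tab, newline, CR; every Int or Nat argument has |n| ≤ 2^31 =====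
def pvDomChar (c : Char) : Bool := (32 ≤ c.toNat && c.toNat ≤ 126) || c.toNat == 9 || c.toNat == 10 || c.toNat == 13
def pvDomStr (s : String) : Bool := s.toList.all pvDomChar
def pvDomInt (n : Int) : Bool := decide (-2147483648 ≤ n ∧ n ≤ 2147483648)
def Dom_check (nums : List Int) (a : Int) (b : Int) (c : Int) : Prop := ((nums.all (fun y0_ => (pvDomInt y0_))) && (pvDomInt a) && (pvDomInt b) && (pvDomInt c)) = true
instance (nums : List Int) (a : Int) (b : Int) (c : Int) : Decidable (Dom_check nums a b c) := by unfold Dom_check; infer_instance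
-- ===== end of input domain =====

-- B splits A's fused loop into two staged passes (collect-and-zero, then scan a running
-- remainder), an alternative decomposition (not claimed faster on the measured inputs);
-- both Pythons mutate nums, B zeroes every visited cell even past A's break point, and
-- the equivalence proved here is about the RETURN value only.

-- ===== PORT A =====
-- fused loop: num += nums[i]; nums[i] = 0; if sum(nums) == 0: break; num += 1
def checkGo : List Int → List Int → Int → Int
  | _, [], num => num
  | nums, i :: rest, num =>
    let num' := num + PySem.List.pyGetD nums i 0
    let nums' := PySem.List.pySetD nums i 0
    if nums'.sum == 0 then num' else checkGo nums' rest (num' + 1)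

def check (nums : List Int) (a : Int) (b : Int) (c : Int) : Int :=
  checkGo nums (PySem.List.pyRange a b c) 0

-- ===== PORT B =====
-- pass 1: vals.append(nums[i]); nums[i] = 0
def collectGo : List Int → List Int → List Int
  | _, [] => []
  | nums, i :: rest =>
    PySem.List.pyGetD nums i 0 :: collectGo (PySem.List.pySetD nums i 0) rest

-- pass 2: num += v; total -= v; if total == 0: return num; num += 1
def scanGo : Int → List Int → Int → Int
  | _, [], num => num
  | total, v :: rest, num =>
    if total - v == 0 then num + v else scanGo (total - v) rest (num + v + 1)

def check_alt (nums : List Int) (a : Int) (b : Int) (c : Int) : Int :=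
  scanGo nums.sum (collectGo nums (PySem.List.pyRange a b c)) 0

-- ===== PRECONDITION & SPEC =====
-- Python A raises ValueError on c = 0 and IndexError on a reached out-of-range index.
-- Pre_ is slightly narrower than A's return domain: it also excludes runs where A's
-- loop breaks (remaining sum zero) before reaching an out-of-range index; A returns
-- there but B's collect pass visits the whole range and raises IndexError.
-- pvLast a b c = the LAST element of range(a,b,c) when that range is nonempty
def pvLast (a b c : Int) : Int :=
  if 0 < c then a + c * ((b - a + c - 1) / c - 1)
  else a + c * ((a - b + -c - 1) / -c - 1)

def Pre_check (nums : List Int) (a : Int) (b : Int) (c : Int) : Prop :=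
  c ≠ 0 ∧ ((0 < c ∧ b ≤ a) ∨ (c < 0 ∧ a ≤ b) ∨
    (-(nums.length : Int) ≤ a ∧ a < nums.length ∧
     -(nums.length : Int) ≤ pvLast a b c ∧ pvLast a b c < nums.length))
instance (nums : List Int) (a : Int) (b : Int) (c : Int) : Decidable (Pre_check nums a b c) := by unfold Pre_check; infer_instance

def pvWitness_check : List Int × Int × Int × Int := ([1, 2, 3], 0, 3, 1)

def Spec_check (nums : List Int) (a : Int) (b : Int) (c : Int) (out : Int) : Prop := out = check_alt nums a b c
instance (nums : List Int) (a : Int) (b : Int) (c : Int) (out : Int) : Decidable (Spec_check nums a b c out) := by unfold Spec_check; infer_instance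

-- ===== CLAIM (what is proved, stated in full; the proofs are below) =====
def Claim_equal_check : Prop := ∀ (nums : List Int) (a : Int) (b : Int) (c : Int), Dom_check nums a b c → Pre_check nums a b c → Spec_check nums a b c (check nums a b c)

-- ===== LEMMAS AND PROOFS =====

lemma pyIdx_of_inRange (xs : List Int) (i : Int) (h : PySem.Raise.InRange xs.length i) :
    ∃ k : Nat, PySem.List.pyIdx? xs.length i = some k ∧ k < xs.length := by
  obtain ⟨h1, h2⟩ := h
  by_cases hb : 0 ≤ i
  · exact ⟨i.toNat, by simp [PySem.List.pyIdx?, hb, h2], by omega⟩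
  · exact ⟨xs.length - (-i).toNat, by simp [PySem.List.pyIdx?, hb, h1], by omega⟩

lemma sum_set_zero (xs : List Int) (k : Nat) (h : k < xs.length) :
    (xs.set k 0).sum = xs.sum - xs[k] := by
  induction xs generalizing k with
  | nil => simp at h
  | cons x xs ih =>
    cases k with
    | zero => simp
    | succ k =>
      simp only [List.set_cons_succ, List.sum_cons, List.getElem_cons_succ]
      rw [ih k (by simpa using h)]; ring

lemma sum_pySetD (xs : List Int) (i : Int) (h : PySem.Raise.InRange xs.length i) :
    (PySem.List.pySetD xs i 0).sum = xs.sum - PySem.List.pyGetD xs i 0 := by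
  obtain ⟨k, hk, hlt⟩ := pyIdx_of_inRange xs i h
  have hset : PySem.List.pySetD xs i 0 = xs.set k 0 := by
    simp [PySem.List.pySetD, PySem.List.pySet?, hk]
  have hget : PySem.List.pyGetD xs i 0 = xs[k] := by
    simp [PySem.List.pyGetD, PySem.List.pyGet?, hk, List.getElem?_eq_getElem hlt]
  rw [hset, hget, sum_set_zero xs k hlt]

lemma length_pySetD' (xs : List Int) (i : Int) (v : Int) :
    (PySem.List.pySetD xs i v).length = xs.length := by
  simp [PySem.List.pySetD, PySem.List.pySet?]
  cases PySem.List.pyIdx? xs.length i <;> simp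

-- A's fused loop equals B's scan over B's collected values
lemma go_eq (l : List Int) : ∀ (nums : List Int) (num : Int),
    (∀ i ∈ l, PySem.Raise.InRange nums.length i) →
    checkGo nums l num = scanGo nums.sum (collectGo nums l) num := by
  induction l with
  | nil => intro nums num _; rfl
  | cons i rest ih =>
    intro nums num hv
    have hi : PySem.Raise.InRange nums.length i := hv i (List.mem_cons_self)
    have hsum := sum_pySetD nums i hi
    simp only [checkGo, collectGo, scanGo]
    rw [← hsum]
    by_cases hz : (PySem.List.pySetD nums i 0).sum = 0
    · simp [hz]
    · simp only [beq_iff_eq, hz, if_false]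
      rw [ih _ _ (fun j hj => by
        rw [length_pySetD']; exact hv j (List.mem_cons_of_mem _ hj)), hsum]

lemma pre_valid (nums : List Int) (a b c : Int) (h : Pre_check nums a b c) :
    ∀ i ∈ PySem.List.pyRange a b c, PySem.Raise.InRange nums.length i := by
  obtain ⟨hc, hcase⟩ := h
  intro i hi
  simp only [PySem.List.pyRange, hc, if_false, List.mem_map, List.mem_range] at hi
  obtain ⟨k, hk, rfl⟩ := hi
  rcases lt_trichotomy 0 c with hpos | hz | hneg
  · simp only [hpos, if_pos] at hk
    by_cases hab : a < b
    · rcases hcase with ⟨h1, h2⟩ | ⟨h1, _⟩ | ⟨h1, h2, h3, h4⟩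
      · omega
      · omega
      · simp only [pvLast, hpos, if_pos] at h3 h4
        have hkk : (k : Int) ≤ (b - a + c - 1) / c - 1 := by
          simp only [hab, if_pos] at hk; omega
        have hub := mul_le_mul_of_nonneg_left hkk (le_of_lt hpos)
        have hlb : 0 ≤ c * (k : Int) := mul_nonneg (le_of_lt hpos) (by positivity)
        constructor <;> linarith
    · simp [hab] at hk
  · omega
  · simp only [show ¬ (0 < c) by omega, if_neg, not_false_iff] at hk
    by_cases hba : b < a
    · rcases hcase with ⟨h1, _⟩ | ⟨h1, h2⟩ | ⟨h1, h2, h3, h4⟩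
      · omega
      · omega
      · simp only [pvLast, show ¬ (0 < c) by omega, if_neg, not_false_iff] at h3 h4
        have hkk : (k : Int) ≤ (a - b + -c - 1) / -c - 1 := by
          simp only [hba, if_pos] at hk; omega
        have hub := mul_le_mul_of_nonpos_left hkk (le_of_lt hneg)
        have hlb : c * (k : Int) ≤ 0 :=
          mul_nonpos_of_nonpos_of_nonneg (le_of_lt hneg) (by positivity)
        constructor <;> linarith
    · simp [hba] at hk

-- ===== VERDICT (by name: the statement is the Claim_ definition above) =====
theorem check_spec : Claim_equal_check := by
  intro nums a b c _ hpre
  unfold Spec_check check check_alt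
  exact go_eq _ nums 0 (pre_valid nums a b c hpre)
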